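-- pv_equiv track=rewrite | github.com/DavitAdeishvili/homework-34 | level 107/homework/main.py | task3
-- ===== SOURCE A (Python) =====
-- def task3(arr):
--     result = []
--     for i in range(len(arr)):
--         count = 0
--         for x in arr[:i]:
--             if x < arr[i]:
--                 count += 1
--         result.append(str(count))
--     return ", ".join(result)
-- ===== SOURCE B (Python) =====
-- def task3(arr):
--     seen = []   # sorted list of the elements already processed
--     out = []
--     for x in arr:
--         lo, hi = 0, len(seen)
--         while lo < hi:           # binary search: first position with seen[pos] >= x
--             mid = (lo + hi) // 2
--             if seen[mid] < x:
--                 lo = mid + 1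
--             else:
--                 hi = mid
--         out.append(str(lo))
--         seen.insert(lo, x)
--     return ", ".join(out)
-- ===== Notes on version B (the rewrite author's own statement) =====
-- stated objective: faster
-- what changed: Instead of rescanning the whole prefix arr[:i] for every index (nested loops), B makes one pass that keeps the already-seen elements in a sorted list and obtains each count as the binary-searched insertion point of the new element.
import Mathlib
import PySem

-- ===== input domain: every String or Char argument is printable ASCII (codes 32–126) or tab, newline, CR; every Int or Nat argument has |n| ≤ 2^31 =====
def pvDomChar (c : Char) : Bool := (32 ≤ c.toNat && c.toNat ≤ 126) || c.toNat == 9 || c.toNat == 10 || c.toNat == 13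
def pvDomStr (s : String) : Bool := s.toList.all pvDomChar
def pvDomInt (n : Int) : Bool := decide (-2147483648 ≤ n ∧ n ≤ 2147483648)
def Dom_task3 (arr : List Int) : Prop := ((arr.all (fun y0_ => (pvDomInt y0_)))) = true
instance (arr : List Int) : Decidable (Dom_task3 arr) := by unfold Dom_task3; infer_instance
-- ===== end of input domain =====

-- B replaces A's quadratic rescan of every prefix with one pass that keeps the already-seen
-- elements in a sorted list and binary-searches each insertion point (objective: faster).

-- ===== PORT A =====
-- A: for each i, count the elements of arr[:i] smaller than arr[i]; join the str counts.
def task3 (arr : List Int) : String :=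
  let result : List String :=
    (PySem.List.pyRange 0 (arr.length : Int) 1).foldl
      (fun result i =>
        let count :=
          (PySem.List.slice arr none (some i)).foldl
            (fun count x => if x < PySem.List.pyGetD arr i 0 then count + 1 else count) (0 : Int)
        result ++ [PySem.Int.toStr count]) []
  PySem.Str.join ", " result

-- ===== PORT B =====
-- B's hand-written binary-search loop (the `while lo < hi` in Source B); lo and hi are always
-- nonnegative, so Nat with `/ 2` is exactly Python's `(lo + hi) // 2`, and seen[mid] is
-- always in range (mid < hi ≤ len seen), so `getD mid 0` is exact.
def task3LB (seen : List Int) (x : Int) (lo hi : Nat) : Nat :=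
  if _h : lo < hi then
    let mid := (lo + hi) / 2
    if seen.getD mid 0 < x then task3LB seen x (mid + 1) hi
    else task3LB seen x lo mid
  else lo
termination_by hi - lo
decreasing_by all_goals omega

def task3_alt (arr : List Int) : String :=
  let st :=
    arr.foldl
      (fun (st : List Int × List String) x =>
        let pos := task3LB st.1 x 0 st.1.length
        (PySem.List.insert st.1 (pos : Int) x, st.2 ++ [PySem.Int.toStr (pos : Int)]))
      ([], [])
  PySem.Str.join ", " st.2

-- ===== PRECONDITION & SPEC =====
def Spec_task3 (arr : List Int) (out : String) : Prop := out = task3_alt arr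
instance (arr : List Int) (out : String) : Decidable (Spec_task3 arr out) := by unfold Spec_task3; infer_instance

-- ===== CLAIM (what is proved, stated in full; the proofs are below) =====
def Claim_equal_task3 : Prop := ∀ (arr : List Int), Dom_task3 arr → Spec_task3 arr (task3 arr)

-- ===== LEMMAS AND PROOFS =====

-- number of elements of p strictly below x
def task3Cnt (p : List Int) (x : Int) : Nat := p.countP (fun y => decide (y < x))

-- the common specification: the str-counts of the remaining list, prefix p already seen
def task3Counts : List Int → List Int → List String
  | _, [] => []
  | p, x :: rest => PySem.Int.toStr ((task3Cnt p x : Nat) : Int) :: task3Counts (p ++ [x]) rest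

lemma task3Cnt_perm {s p : List Int} (h : s.Perm p) (x : Int) : task3Cnt s x = task3Cnt p x :=
  h.countP_eq _

-- in a sorted list, s[j] < x iff j is below the number of elements < x
lemma task3_getElem_lt_iff (s : List Int) (hs : s.Pairwise (· ≤ ·)) (x : Int) :
    ∀ (j : Nat) (hj : j < s.length), s[j] < x ↔ j < task3Cnt s x := by
  induction s with
  | nil => intro j hj; simp at hj
  | cons a s ih =>
    rw [List.pairwise_cons] at hs
    obtain ⟨ha, hs'⟩ := hs
    intro j hj
    cases j with
    | zero =>
      simp only [List.getElem_cons_zero, task3Cnt, List.countP_cons]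
      by_cases hax : a < x
      · simp [hax]
      · have h0 : s.countP (fun y => decide (y < x)) = 0 := by
          rw [List.countP_eq_zero]
          intro y hy
          simp only [decide_eq_true_eq]
          have := ha y hy
          omega
        simp [hax, h0]
    | succ j =>
      simp only [List.getElem_cons_succ]
      have hj' : j < s.length := by simpa using hj
      rw [ih hs' j hj']
      simp only [task3Cnt, List.countP_cons]
      by_cases hax : a < x
      · simp [hax]
      · have hx : x ≤ a := by omega
        have hsx : x ≤ s[j] := le_trans hx (ha _ (List.getElem_mem hj'))
        have h0 : s.countP (fun y => decide (y < x)) = 0 := by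
          rw [List.countP_eq_zero]
          intro y hy
          simp only [decide_eq_true_eq]
          have := ha y hy; omega
        simp [hax, h0]

-- the binary-search loop returns the count, for a sorted list
lemma task3LB_eq_aux (s : List Int) (x : Int) (hs : s.Pairwise (· ≤ ·)) :
    ∀ (n lo hi : Nat), hi - lo ≤ n → lo ≤ task3Cnt s x → task3Cnt s x ≤ hi → hi ≤ s.length →
      task3LB s x lo hi = task3Cnt s x := by
  intro n
  induction n with
  | zero =>
    intro lo hi h1 h2 h3 h4
    rw [task3LB, dif_neg (by omega)]
    omega
  | succ n ih =>
    intro lo hi h1 h2 h3 h4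
    rw [task3LB]
    by_cases h : lo < hi
    · rw [dif_pos h]
      have hm : (lo + hi) / 2 < s.length := by omega
      have hiff := task3_getElem_lt_iff s hs x ((lo + hi) / 2) hm
      show (if s.getD ((lo + hi) / 2) 0 < x then task3LB s x ((lo + hi) / 2 + 1) hi
             else task3LB s x lo ((lo + hi) / 2)) = task3Cnt s x
      rw [List.getD_eq_getElem s 0 hm]
      by_cases hb : s[(lo + hi) / 2] < x
      · rw [if_pos hb]
        exact ih ((lo + hi) / 2 + 1) hi (by omega) (by omega) h3 h4
      · rw [if_neg hb]
        exact ih lo ((lo + hi) / 2) (by omega) h2 (by omega) (by omega)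
    · rw [dif_neg h]; omega

-- inserting x at position (task3Cnt s x) keeps the list sorted
lemma task3_insert_sorted (s : List Int) (hs : s.Pairwise (· ≤ ·)) (x : Int) :
    (s.take (task3Cnt s x) ++ x :: s.drop (task3Cnt s x)).Pairwise (· ≤ ·) := by
  have hc : task3Cnt s x ≤ s.length := List.countP_le_length
  have htk : ∀ a ∈ s.take (task3Cnt s x), a < x := by
    intro a ha
    obtain ⟨j, hj, rfl⟩ := List.mem_iff_getElem.mp ha
    rw [List.getElem_take]
    have hj' : j < task3Cnt s x := by simp [List.length_take] at hj; omega
    exact (task3_getElem_lt_iff s hs x j (by omega)).mpr (by omega)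
  have hdr : ∀ b ∈ s.drop (task3Cnt s x), x ≤ b := by
    intro b hb
    obtain ⟨k, hk, rfl⟩ := List.mem_iff_getElem.mp hb
    rw [List.getElem_drop]
    have hk' : task3Cnt s x + k < s.length := by
      have := List.length_drop (l := s) (i := task3Cnt s x); omega
    have := task3_getElem_lt_iff s hs x (task3Cnt s x + k) hk'
    omega
  rw [List.pairwise_append]
  refine ⟨hs.sublist (List.take_sublist ..), ?_, ?_⟩
  · rw [List.pairwise_cons]
    exact ⟨hdr, hs.sublist (List.drop_sublist ..)⟩
  · intro a ha b hb
    rcases List.mem_cons.mp hb with rfl | hb'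
    · exact le_of_lt (htk a ha)
    · exact le_trans (le_of_lt (htk a ha)) (hdr b hb')

-- B's fold computes task3Counts
lemma task3_alt_loop (rest : List Int) : ∀ (seen p : List Int) (out : List String),
    seen.Pairwise (· ≤ ·) → seen.Perm p →
    (rest.foldl
      (fun (st : List Int × List String) x =>
        let pos := task3LB st.1 x 0 st.1.length
        (PySem.List.insert st.1 (pos : Int) x, st.2 ++ [PySem.Int.toStr (pos : Int)]))
      (seen, out)).2 = out ++ task3Counts p rest := by
  induction rest with
  | nil => intro seen p out _ _; simp [task3Counts]
  | cons x rest ih =>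
    intro seen p out hsort hperm
    have hc : task3Cnt seen x ≤ seen.length := List.countP_le_length
    have hpos : task3LB seen x 0 seen.length = task3Cnt seen x :=
      task3LB_eq_aux seen x hsort seen.length 0 seen.length (by omega) (by omega) hc le_rfl
    simp only [List.foldl_cons, hpos, PySem.List.insert_natCast seen _ x hc]
    have hp2 : (List.take (task3Cnt seen x) seen ++ x :: List.drop (task3Cnt seen x) seen).Perm
        (p ++ [x]) := by
      refine (List.perm_middle).trans ?_
      rw [List.take_append_drop]
      exact (hperm.cons x).trans (List.perm_append_singleton x p).symm
    rw [ih _ (p ++ [x]) _ (task3_insert_sorted seen hsort x) hp2]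
    simp [task3Counts, task3Cnt_perm hperm x]

-- A's per-index counts form task3Counts
lemma task3_map_eq_counts (arr : List Int) : ∀ (p : List Int),
    (List.range arr.length).map
      (fun i => PySem.Int.toStr ((task3Cnt (p ++ arr.take i) (arr.getD i 0) : Nat) : Int))
      = task3Counts p arr := by
  induction arr with
  | nil => intro p; simp [task3Counts]
  | cons x rest ih =>
    intro p
    rw [List.length_cons, List.range_succ_eq_map, List.map_cons, List.map_map]
    rw [task3Counts]
    congr 1
    · simp
    · rw [← ih (p ++ [x])]
      apply List.map_congr_left
      intro i _
      simp only [Function.comp_apply, List.take_succ_cons, List.getD_cons_succ]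
      rw [show p ++ x :: List.take i rest = p ++ [x] ++ List.take i rest from by simp]

-- ===== VERDICT (by name: the statement is the Claim_ definition above) =====
theorem task3_spec : Claim_equal_task3 := by
  intro arr _
  show task3 arr = task3_alt arr
  show PySem.Str.join ", "
      ((PySem.List.pyRange 0 (arr.length : Int) 1).foldl
        (fun result i =>
          result ++ [PySem.Int.toStr
            ((PySem.List.slice arr none (some i)).foldl
              (fun count x => if x < PySem.List.pyGetD arr i 0 then count + 1 else count)
              (0 : Int))]) [])
    = PySem.Str.join ", "
      ((arr.foldl
        (fun (st : List Int × List String) x =>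
          let pos := task3LB st.1 x 0 st.1.length
          (PySem.List.insert st.1 (pos : Int) x, st.2 ++ [PySem.Int.toStr (pos : Int)]))
        ([], [])).2)
  rw [task3_alt_loop arr [] [] [] List.Pairwise.nil (List.Perm.refl [])]
  rw [PySem.List.pyRange_one]
  simp only [Int.sub_zero, Int.toNat_natCast, List.foldl_map,
    PySem.List.foldl_append_singleton_eq_map, List.nil_append]
  rw [← task3_map_eq_counts arr []]
  apply congrArg
  apply List.map_congr_left
  intro k hk
  simp only [zero_add, PySem.List.slice_to_natCast, PySem.List.pyGetD_natCast]
  rw [show (fun (count : Int) (x : Int) => if x < arr.getD k 0 then count + 1 else count)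
      = (fun (count : Int) (x : Int) =>
          if (decide (x < arr.getD k 0)) = true then count + 1 else count) from by
    funext c y; simp]
  rw [PySem.List.foldl_count_if]
  simp [task3Cnt]
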